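-- pv_equiv track=rewrite | github.com/alexandraback/datacollection | solutions_5669245564223488_1/Python/Heidirose/ProblemB.py | is_valid_train
-- ===== SOURCE A (Python) =====
-- def is_valid_train(train):
--     ls = set(["a", "b", "c", "d", "e", "f", "g", "h", "i", "j", "k", "l", "m", "n", "o", "p", "q", "r", "s", "t", "u", "v", "w", "x", "y", "z"])
--     previous = None
--     for letter in train:
--         if previous != None:
--             if letter == previous:
--                 continue
--             elif letter in ls:
--                 previous = letter
--                 ls.remove(letter)
--             else:
--                 return False
--         else:
--             previous = letter
--             ls.remove(letter)
--     return True
-- ===== SOURCE B (Python) =====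
-- def is_valid_train(train):
--     # Pass 1: collapse consecutive runs into a list of block letters.
--     blocks = []
--     for letter in train:
--         if not blocks or blocks[-1] != letter:
--             blocks.append(letter)
--     if not blocks:
--         return True
--     # Pass 2: every block letter must be a fresh lowercase letter.
--     ls = set("abcdefghijklmnopqrstuvwxyz")
--     ls.remove(blocks[0])
--     for b in blocks[1:]:
--         if b not in ls:
--             return False
--         ls.remove(b)
--     return True
-- ===== Notes on version B (the rewrite author's own statement) =====
-- stated objective: alternative
-- what changed: Two-pass decomposition: first collapse consecutive runs into a list of block letters, then validate that block list against a shrinking alphabet set, instead of A's single pass that tracks the preceding letter in a variable to detect block boundaries inline.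
import Mathlib
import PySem

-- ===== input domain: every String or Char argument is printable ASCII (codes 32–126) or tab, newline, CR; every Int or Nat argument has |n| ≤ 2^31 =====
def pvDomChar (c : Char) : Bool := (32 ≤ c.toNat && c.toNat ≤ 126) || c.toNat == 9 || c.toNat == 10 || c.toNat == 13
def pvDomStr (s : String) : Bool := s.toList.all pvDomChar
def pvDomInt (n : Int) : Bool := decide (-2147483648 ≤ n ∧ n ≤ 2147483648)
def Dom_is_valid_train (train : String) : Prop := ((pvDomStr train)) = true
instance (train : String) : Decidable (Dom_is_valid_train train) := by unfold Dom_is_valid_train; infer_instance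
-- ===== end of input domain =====

-- B restructures A's single last-letter-tracking pass into two passes: collapse consecutive
-- runs into a block list, then validate the blocks against a shrinking alphabet set
-- (objective: alternative decomposition; return-value equivalence only).

-- ===== PORT A =====
def pvLsInit : PySem.Set Char := PySem.Set.ofList "abcdefghijklmnopqrstuvwxyz".toList

-- A's loop: state = (previously seen letter, ls); early 'return False' = false.
def pvGoA : Option Char → PySem.Set Char → List Char → Bool
  | _, _, [] => true
  | some p, ls, c :: rest =>
      if c == p then pvGoA (some p) ls rest
      else if PySem.Set.contains ls c then
        -- 'ls.remove(letter)' under the membership guard: exact as discard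
        pvGoA (some c) (PySem.Set.discard ls c) rest
      else false
  | none, ls, c :: rest =>
      match PySem.Set.remove? ls c with
      | none => false       -- KeyError in Python; excluded by Pre_
      | some ls' => pvGoA (some c) ls' rest

def is_valid_train (train : String) : Bool := pvGoA none pvLsInit train.toList

-- ===== PORT B =====
-- pass 1 of Source B: blocks accumulator, append when last element differs
def pvBuildBlocks : List Char → List Char → List Char
  | bs, [] => bs
  | bs, c :: rest =>
      if bs = [] ∨ bs.getLast? ≠ some c then pvBuildBlocks (bs ++ [c]) rest
      else pvBuildBlocks bs rest

-- pass 2 of Source B: validate the remaining blocks against the shrinking set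
def pvGoB : PySem.Set Char → List Char → Bool
  | _, [] => true
  | ls, b :: rest =>
      if ¬ PySem.Set.contains ls b then false
      else pvGoB (PySem.Set.discard ls b) rest   -- 'ls.remove(b)' guarded: exact as discard

def is_valid_train_alt (train : String) : Bool :=
  match pvBuildBlocks [] train.toList with
  | [] => true
  | b :: rest =>
      match PySem.Set.remove? pvLsInit b with
      | none => false       -- KeyError in Python; excluded by Pre_
      | some ls' => pvGoB ls' rest

-- ===== PRECONDITION & SPEC =====
-- Pre_ excludes exactly the inputs where Python A raises KeyError: a nonempty train whose
-- first character is not a lowercase letter (B raises there too).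
def Pre_is_valid_train (train : String) : Prop :=
  train.toList.head?.all (fun c => 'a' ≤ c && c ≤ 'z') = true
instance (train : String) : Decidable (Pre_is_valid_train train) := by
  unfold Pre_is_valid_train; infer_instance
def pvWitness_is_valid_train : String := "aab"

def Spec_is_valid_train (train : String) (out : Bool) : Prop := out = is_valid_train_alt train
instance (train : String) (out : Bool) : Decidable (Spec_is_valid_train train out) := by unfold Spec_is_valid_train; infer_instance

-- ===== CLAIM (what is proved, stated in full; the proofs are below) =====
def Claim_equal_is_valid_train : Prop := ∀ (train : String), Dom_is_valid_train train → Pre_is_valid_train train → Spec_is_valid_train train (is_valid_train train)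

-- ===== LEMMAS AND PROOFS =====

-- the block letters of cs, given that the previous block letter is p
def pvCollapse : Char → List Char → List Char
  | _, [] => []
  | p, c :: cs => if c = p then pvCollapse p cs else c :: pvCollapse c cs

theorem pvGoA_eq_goB_collapse (cs : List Char) : ∀ (p : Char) (ls : PySem.Set Char),
    pvGoA (some p) ls cs = pvGoB ls (pvCollapse p cs) := by
  induction cs with
  | nil => intro p ls; rfl
  | cons c cs ih =>
      intro p ls
      by_cases h : c = p
      · simp [pvGoA, pvCollapse, h, ih]
      · simp [pvGoA, pvCollapse, h, pvGoB, ih]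

theorem pvBuildBlocks_concat (cs : List Char) : ∀ (bs : List Char) (b : Char),
    pvBuildBlocks (bs ++ [b]) cs = (bs ++ [b]) ++ pvCollapse b cs := by
  induction cs with
  | nil => intro bs b; simp [pvBuildBlocks, pvCollapse]
  | cons c cs ih =>
      intro bs b
      by_cases h : c = b
      · simp [pvBuildBlocks, pvCollapse, h, ih]
      · simp [pvBuildBlocks, pvCollapse, h, Ne.symm h]
        have := ih (bs ++ [b]) c
        simpa using this

-- ===== VERDICT (by name: the statement is the Claim_ definition above) =====
theorem is_valid_train_spec : Claim_equal_is_valid_train := by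
  intro train _ _
  unfold Spec_is_valid_train is_valid_train is_valid_train_alt
  cases h : train.toList with
  | nil => rfl
  | cons c cs =>
      have hb : pvBuildBlocks [] (c :: cs) = c :: pvCollapse c cs := by
        have := pvBuildBlocks_concat cs [] c
        simpa [pvBuildBlocks] using this
      rw [hb]
      cases hr : PySem.Set.remove? pvLsInit c with
      | none => simp [pvGoA, hr]
      | some ls' => simp [pvGoA, hr, pvGoA_eq_goB_collapse]
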